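-- pv_equiv track=rewrite | github.com/GundalaNikhil/DSA | dsa-problems/DP/solutions/python/DP-012-balanced-partition-size-limit.py | min_larger_group_size
-- ===== SOURCE A (Python) =====
-- def min_larger_group_size(a: list[int], D: int) -> int:
--     n = len(a)
--     total = sum(a)
--     dp = [set() for _ in range(n + 1)]
--     dp[0].add(0)
--
--     for x in a:
--         for k in range(n - 1, -1, -1):
--             for s in list(dp[k]):
--                 dp[k + 1].add(s + x)
--
--     ans = None
--     for k in range(n + 1):
--         for s in dp[k]:
--             if abs(total - 2 * s) <= D:
--                 cand = max(k, n - k)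
--                 if ans is None or cand < ans:
--                     ans = cand
--     return -1 if ans is None else ans
-- ===== SOURCE B (Python) =====
-- def _half_sums(lst):
--     # cur[k] = set of sums of k-element subsets of the prefix processed so far,
--     # rebuilt functionally; returns {k: sorted list of doubled sums}
--     cur = [{0}]
--     for x in lst:
--         cur = [(cur[k] if k < len(cur) else set())
--                | ({s + x for s in cur[k - 1]} if k > 0 else set())
--                for k in range(len(cur) + 1)]
--     return {k: sorted([2 * s for s in cur[k]]) for k in range(len(cur))}
--
--
-- def _has_pair_in_window(xs, ys, lo, hi):
--     # xs, ys sorted ascending: is there x + y with lo <= x + y <= hi?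
--     i, j = 0, len(ys) - 1
--     while i < len(xs) and j >= 0:
--         s = xs[i] + ys[j]
--         if hi < s:
--             j = j - 1
--         elif s < lo:
--             i = i + 1
--         else:
--             return True
--     return False
--
--
-- def min_larger_group_size(a, D):
--     # Meet in the middle: per-size doubled subset sums of each half in sorted
--     # lists; a merged two-pointer pretest settles the -1 case, then size pairs
--     # are tried in ascending order of their group cost with a two-pointer
--     # window test each, returning at the first hit.
--     n = len(a)
--     total = sum(a)
--     h = n // 2
--     SA = _half_sums(a[:h])
--     SB = _half_sums(a[h:])
--     lo, hi = total - D, total + D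
--     allA = sorted([v for la in SA.values() for v in la])
--     allB = sorted([v for lb in SB.values() for v in lb])
--     if not _has_pair_in_window(allA, allB, lo, hi):
--         return -1
--     pairs = [(pa, pb) for pa in SA.items() for pb in SB.items()]
--     pairs.sort(key=lambda q: max(q[0][0] + q[1][0], n - q[0][0] - q[1][0]))
--     for pa, pb in pairs:
--         if _has_pair_in_window(pa[1], pb[1], lo, hi):
--             return max(pa[0] + pb[0], n - pa[0] - pb[0])
--     return -1
-- ===== Notes on version B (the rewrite author's own statement) =====
-- stated objective: faster
-- what changed: Replaces A's in-place knapsack DP over n+1 per-size sum sets with meet-in-the-middle: B enumerates the reachable (sum, size) pairs of each half of the list, groups each half's doubled sums by size into sorted lists, settles the -1 case with one merged two-pointer window test, and then tries size pairs in ascending order of their group cost with a two-pointer window test each, returning at the first hit.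
import Mathlib
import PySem

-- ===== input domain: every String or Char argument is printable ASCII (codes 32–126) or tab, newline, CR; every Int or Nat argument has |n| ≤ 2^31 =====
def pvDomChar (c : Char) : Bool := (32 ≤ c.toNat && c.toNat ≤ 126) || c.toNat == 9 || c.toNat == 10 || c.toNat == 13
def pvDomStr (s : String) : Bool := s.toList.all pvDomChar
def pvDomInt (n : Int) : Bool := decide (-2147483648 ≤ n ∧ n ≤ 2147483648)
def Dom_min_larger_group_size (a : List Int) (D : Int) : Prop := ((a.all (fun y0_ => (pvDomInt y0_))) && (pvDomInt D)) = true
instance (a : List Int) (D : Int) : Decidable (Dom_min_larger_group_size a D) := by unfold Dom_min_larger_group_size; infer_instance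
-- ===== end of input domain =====

-- B replaces A's in-place knapsack DP over per-size sum sets by meet-in-the-middle
-- (measured faster in a timing run): per-size sorted doubled subset sums of each
-- half, a merged two-pointer pretest for the -1 case, then size pairs in ascending
-- candidate order with a two-pointer window test each, returning at the first hit.

-- ===== PORT A =====
-- the inner two loops of A's DP phase: 'for k in range(n-1,-1,-1): for s in list(dp[k]): dp[k+1].add(s+x)'
def pvSetPass (n x : Int) (dp : List (PySem.Set Int)) : List (PySem.Set Int) :=
  (PySem.List.pyRange (n - 1) (-1) (-1)).foldl (fun dp k =>
    (PySem.List.pyGetD dp k PySem.Set.empty).foldl (fun dp s =>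
      PySem.List.pySetD dp (k + 1)
        (PySem.Set.add (PySem.List.pyGetD dp (k + 1) PySem.Set.empty) (s + x))) dp) dp

-- A's answer update: 'if abs(total-2*s) <= D: cand = max(k, n-k); if ans is None or cand < ans: ans = cand'
def pvAnsUpd (total D n k : Int) (ans : Option Int) (s : Int) : Option Int :=
  if |total - 2 * s| ≤ D then
    let cand := max k (n - k)
    match ans with
    | none => some cand
    | some v => if cand < v then some cand else some v
  else ans

def min_larger_group_size (a : List Int) (D : Int) : Int :=
  let n : Int := (a.length : Int)
  let total : Int := a.sum
  let dp : List (PySem.Set Int) := (List.range (a.length + 1)).map (fun _ => PySem.Set.empty)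
  let dp := PySem.List.pySetD dp 0 (PySem.Set.add (PySem.List.pyGetD dp 0 PySem.Set.empty) 0)
  let dp := a.foldl (fun dp x => pvSetPass n x dp) dp
  let ans : Option Int := (PySem.List.pyRange 0 (n + 1) 1).foldl (fun ans k =>
    (PySem.List.pyGetD dp k PySem.Set.empty).foldl (fun ans s => pvAnsUpd total D n k ans s) ans) none
  match ans with
  | none => -1
  | some v => v

-- ===== PORT B =====
-- B's helper _half_sums: functional per-size subset-sum sets, then per-size sorted doubled sums
def pvHalf (lst : List Int) : PySem.Dict Int (List Int) :=
  let cur := lst.foldl (fun cur x =>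
    (List.range (cur.length + 1)).map (fun k =>
      PySem.Set.union
        (if k < cur.length then cur.getD k PySem.Set.empty else PySem.Set.empty)
        (if 0 < k then PySem.Set.ofList ((cur.getD (k - 1) PySem.Set.empty).map (fun s => s + x))
         else PySem.Set.empty)))
    [PySem.Set.ofList [(0 : Int)]]
  PySem.Dict.ofList ((List.range cur.length).map (fun k =>
    (((k : Nat) : Int),
      PySem.List.sorted ((cur.getD k PySem.Set.empty).map (fun s => 2 * s)) (fun v => v) false)))

-- B's helper _has_pair_in_window: the two-pointer loop
def pvTwoPtr (xs ys : List Int) (lo hi : Int) (i : Nat) (j : Int) : Bool :=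
  if _h : i < xs.length ∧ 0 ≤ j then
    let s := PySem.List.pyGetD xs ((i : Nat) : Int) 0 + PySem.List.pyGetD ys j 0
    if hi < s then pvTwoPtr xs ys lo hi i (j - 1)
    else if s < lo then pvTwoPtr xs ys lo hi (i + 1) j
    else true
  else false
termination_by (xs.length - i) + (j + 1).toNat
decreasing_by all_goals omega

def pvHasPair (xs ys : List Int) (lo hi : Int) : Bool :=
  pvTwoPtr xs ys lo hi 0 ((ys.length : Int) - 1)

-- B's final loop: 'for pa, pb in pairs: if _has_pair_in_window(...): return ...' / 'return -1'
def pvScan (n lo hi : Int) : List ((Int × List Int) × (Int × List Int)) → Int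
  | [] => -1
  | q :: t =>
    if pvHasPair q.1.2 q.2.2 lo hi then max (q.1.1 + q.2.1) (n - q.1.1 - q.2.1)
    else pvScan n lo hi t

def min_larger_group_size_alt (a : List Int) (D : Int) : Int :=
  let n : Int := (a.length : Int)
  let total : Int := a.sum
  let h : Int := PySem.Int.floordiv n 2
  let SA := pvHalf (PySem.List.slice a none (some h))
  let SB := pvHalf (PySem.List.slice a (some h) none)
  let lo := total - D
  let hi := total + D
  let allA := PySem.List.sorted (SA.values.flatMap (fun la => la)) (fun v => v) false
  let allB := PySem.List.sorted (SB.values.flatMap (fun lb => lb)) (fun v => v) false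
  if pvHasPair allA allB lo hi = false then -1
  else
    let pairs := PySem.List.sorted
      (SA.items.flatMap (fun pa => SB.items.map (fun pb => (pa, pb))))
      (fun q => max (q.1.1 + q.2.1) (n - q.1.1 - q.2.1)) false
    pvScan n lo hi pairs

-- ===== PRECONDITION & SPEC =====
def Spec_min_larger_group_size (a : List Int) (D : Int) (out : Int) : Prop := out = min_larger_group_size_alt a D
instance (a : List Int) (D : Int) (out : Int) : Decidable (Spec_min_larger_group_size a D out) := by unfold Spec_min_larger_group_size; infer_instance

-- ===== CLAIM (what is proved, stated in full; the proofs are below) =====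
def Claim_equal_min_larger_group_size : Prop := ∀ (a : List Int) (D : Int), Dom_min_larger_group_size a D → Spec_min_larger_group_size a D (min_larger_group_size a D)

-- ===== LEMMAS AND PROOFS =====

-- the common spec: c is a candidate iff some sublist t of a realises it
def pvCand (a : List Int) (D c : Int) : Prop :=
  ∃ t : List Int, t.Sublist a ∧ |a.sum - 2 * t.sum| ≤ D ∧
    c = max (t.length : Int) ((a.length : Int) - (t.length : Int))

-- running-min machinery shared by both reductions
def pvMinO (a : Option Int) (x : Int) : Option Int :=
  match a with
  | none => some x
  | some v => some (min v x)

def pvRep : Option Int → Int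
  | none => -1
  | some v => v

theorem pv_minO_fold_some_gen (L : List Int) : ∀ (w : Int),
    L.foldl pvMinO (some w) = some (L.foldl min w) := by
  induction L with
  | nil => intro w; rfl
  | cons x t ih => intro w; simp only [List.foldl_cons]; exact ih (min w x)

theorem pv_minO_fold_cons (x : Int) (t : List Int) :
    (x :: t).foldl pvMinO none = some (t.foldl min x) := by
  simp only [List.foldl_cons]
  exact pv_minO_fold_some_gen t x

theorem pv_minO_fold_some_iff (L : List Int) (v : Int) :
    L.foldl pvMinO none = some v ↔ v ∈ L ∧ ∀ x ∈ L, v ≤ x := by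
  cases L with
  | nil => simp [List.foldl_nil]
  | cons x t =>
    rw [pv_minO_fold_cons]
    constructor
    · intro h
      have hv : t.foldl min x = v := by injection h
      subst hv
      constructor
      · rcases PySem.List.foldl_min_mem t x with h1 | h1
        · rw [h1]; exact List.mem_cons_self
        · exact List.mem_cons_of_mem _ h1
      · intro y hy
        rcases List.mem_cons.mp hy with rfl | hy
        · exact (PySem.List.foldl_min_le t y).1
        · exact (PySem.List.foldl_min_le t x).2 y hy
    · rintro ⟨hmem, hmin⟩
      have h1 : t.foldl min x ≤ v := by
        rcases List.mem_cons.mp hmem with rfl | hmem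
        · exact (PySem.List.foldl_min_le t v).1
        · exact (PySem.List.foldl_min_le t x).2 v hmem
      have h2 : v ≤ t.foldl min x := by
        rcases PySem.List.foldl_min_mem t x with h3 | h3
        · rw [h3]; exact hmin x List.mem_cons_self
        · exact hmin _ (List.mem_cons_of_mem _ h3)
      rw [show t.foldl min x = v by omega]

theorem pv_minO_fold_mem_eq (L1 L2 : List Int) (h : ∀ v, v ∈ L1 ↔ v ∈ L2) :
    L1.foldl pvMinO none = L2.foldl pvMinO none := by
  cases hL1 : L1 with
  | nil =>
    cases hL2 : L2 with
    | nil => rfl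
    | cons y t =>
      exact absurd ((h y).mpr (hL2 ▸ List.mem_cons_self)) (by simp [hL1])
  | cons x t =>
    have h1 : L1.foldl pvMinO none = some (t.foldl min x) := by rw [hL1]; exact pv_minO_fold_cons x t
    rw [← hL1, h1]
    have hc := (pv_minO_fold_some_iff L1 (t.foldl min x)).mp h1
    exact ((pv_minO_fold_some_iff L2 (t.foldl min x)).mpr
      ⟨(h _).mp hc.1, fun y hy => hc.2 y ((h y).mpr hy)⟩).symm

-- small List.getD/set facts
theorem pv_getD_set_self {α : Type} (l : List α) (i : Nat) (a d : α) (h : i < l.length) :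
    (l.set i a).getD i d = a := by
  rw [List.getD_eq_getElem _ _ (by simpa using h)]
  exact List.getElem_set_self _

theorem pv_getD_set_ne {α : Type} (l : List α) (i j : Nat) (a d : α) (h : i ≠ j) :
    (l.set i a).getD j d = l.getD j d := by
  by_cases hj : j < l.length
  · rw [List.getD_eq_getElem _ _ (by simpa using hj), List.getD_eq_getElem _ _ hj]
    exact List.getElem_set_ne h _
  · rw [List.getD_eq_default _ _ (by simp; omega), List.getD_eq_default _ _ (by omega)]

theorem pv_set_getD_self {α : Type} (l : List α) (j : Nat) (d : α) :
    l.set j (l.getD j d) = l := by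
  by_cases hj : j < l.length
  · rw [List.getD_eq_getElem _ _ hj]; exact List.set_getElem_self hj
  · exact List.set_eq_of_length_le (by omega)

theorem pv_getD_replicate {α : Type} (n j : Nat) (c : α) :
    (List.replicate n c).getD j c = c := by
  by_cases h : j < n
  · exact List.getD_replicate (x := c) h
  · exact List.getD_eq_default _ _ (by simp; omega)

-- collapse A's innermost loop: repeatedly setting slot j is one set of a fold
theorem pv_A_inner (x : Int) (j : Nat) (l : List Int) : ∀ (dp : List (PySem.Set Int)),
    l.foldl (fun dp s => dp.set j (PySem.Set.add (dp.getD j PySem.Set.empty) (s + x))) dp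
    = dp.set j (l.foldl (fun t s => PySem.Set.add t (s + x)) (dp.getD j PySem.Set.empty)) := by
  induction l with
  | nil => intro dp; simpa using (pv_set_getD_self dp j PySem.Set.empty).symm
  | cons h t ih =>
    intro dp
    simp only [List.foldl_cons]
    rw [ih]
    by_cases hj : j < dp.length
    · rw [pv_getD_set_self _ _ _ _ hj, List.set_set]
    · rw [List.set_eq_of_length_le (l := dp) (by omega),
        List.set_eq_of_length_le (l := dp) (by omega),
        List.set_eq_of_length_le (l := dp) (by omega)]

-- generic: the countdown pass writes g(old[j-1], old[j]) into slot j for 1 ≤ j ≤ m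
theorem pv_pass_len {α : Type} (f : List α → Int → α) (r : List Int) : ∀ (dp : List α),
    (r.foldl (fun dp k => PySem.List.pySetD dp (k + 1) (f dp k)) dp).length = dp.length := by
  induction r with
  | nil => intro dp; rfl
  | cons h t ih => intro dp; simp only [List.foldl_cons]; rw [ih, PySem.List.length_pySetD]

theorem pv_pass_getD {α : Type} (g : α → α → α) (d : α) :
    ∀ (m : Nat) (dp : List α), m < dp.length → ∀ j : Nat,
    ((PySem.List.pyRange ((m : Int) - 1) (-1) (-1)).foldl
      (fun dp k => PySem.List.pySetD dp (k + 1)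
        (g (PySem.List.pyGetD dp k d) (PySem.List.pyGetD dp (k + 1) d))) dp).getD j d
    = if 1 ≤ j ∧ j ≤ m then g (dp.getD (j - 1) d) (dp.getD j d) else dp.getD j d := by
  intro m
  induction m with
  | zero =>
    intro dp _ j
    rw [PySem.List.pyRange_neg_one_eq_nil (by norm_num)]
    simp only [List.foldl_nil]
    rw [if_neg (by omega)]
  | succ m ih =>
    intro dp hm j
    have h1 : ((m + 1 : Nat) : Int) - 1 = ((m : Nat) : Int) := by push_cast; ring
    rw [h1, PySem.List.pyRange_neg_one_cons (by omega)]
    simp only [List.foldl_cons]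
    have e1 : PySem.List.pySetD dp ((m : Int) + 1)
        (g (PySem.List.pyGetD dp (m : Int) d) (PySem.List.pyGetD dp ((m : Int) + 1) d))
        = dp.set (m + 1) (g (dp.getD m d) (dp.getD (m + 1) d)) := by
      rw [show ((m : Int) + 1) = ((m + 1 : Nat) : Int) by push_cast; ring,
        PySem.List.pySetD_natCast, PySem.List.pyGetD_natCast, PySem.List.pyGetD_natCast]
    rw [e1]
    have hm' : m < (dp.set (m + 1) (g (dp.getD m d) (dp.getD (m + 1) d))).length := by
      simp; omega
    rw [ih _ hm' j]
    by_cases hj : 1 ≤ j ∧ j ≤ m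
    · rw [if_pos hj, if_pos (by omega),
        pv_getD_set_ne _ _ _ _ _ (by omega), pv_getD_set_ne _ _ _ _ _ (by omega)]
    · rw [if_neg hj]
      by_cases hj2 : j = m + 1
      · subst hj2
        rw [if_pos (by omega), pv_getD_set_self _ _ _ _ (by omega)]
        simp
      · rw [if_neg (by omega), pv_getD_set_ne _ _ _ _ _ (by omega)]

-- instantiated characterization of A's countdown pass
def pvGA (x : Int) (S T : PySem.Set Int) : PySem.Set Int :=
  S.foldl (fun t s => PySem.Set.add t (s + x)) T

theorem pv_setPass_eq (x : Int) (m : Nat) (dp : List (PySem.Set Int)) :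
    pvSetPass (m : Int) x dp
    = (PySem.List.pyRange ((m : Int) - 1) (-1) (-1)).foldl
        (fun dp k => PySem.List.pySetD dp (k + 1)
          (pvGA x (PySem.List.pyGetD dp k PySem.Set.empty)
            (PySem.List.pyGetD dp (k + 1) PySem.Set.empty))) dp := by
  unfold pvSetPass
  apply PySem.List.foldl_congr_mem
  intro dp k hk
  have hk0 : 0 ≤ k := by
    have := PySem.List.mem_pyRange_neg_one.mp hk; omega
  have hk1 : (k + 1).toNat = k.toNat + 1 := by omega
  rw [PySem.List.pyGetD_of_nonneg _ _ hk0]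
  calc (dp.getD k.toNat PySem.Set.empty).foldl
        (fun dp s => PySem.List.pySetD dp (k + 1)
          (PySem.Set.add (PySem.List.pyGetD dp (k + 1) PySem.Set.empty) (s + x))) dp
      = (dp.getD k.toNat PySem.Set.empty).foldl
        (fun dp s => dp.set (k.toNat + 1)
          (PySem.Set.add (dp.getD (k.toNat + 1) PySem.Set.empty) (s + x))) dp := by
        apply PySem.List.foldl_congr_mem
        intro dp' s _
        rw [PySem.List.pySetD_of_nonneg _ _ (by omega),
          PySem.List.pyGetD_of_nonneg _ _ (by omega), hk1]
    _ = _ := by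
        rw [pv_A_inner]
        rw [PySem.List.pySetD_of_nonneg _ _ (by omega),
          PySem.List.pyGetD_of_nonneg _ _ (by omega), hk1]
        rfl

theorem pv_setPass_getD (x : Int) (m : Nat) (dp : List (PySem.Set Int)) (hm : m < dp.length) (j : Nat) :
    (pvSetPass (m : Int) x dp).getD j PySem.Set.empty
    = if 1 ≤ j ∧ j ≤ m then
        pvGA x (dp.getD (j - 1) PySem.Set.empty) (dp.getD j PySem.Set.empty)
      else dp.getD j PySem.Set.empty := by
  rw [pv_setPass_eq]
  exact pv_pass_getD (pvGA x) PySem.Set.empty m dp hm j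

theorem pv_setPass_len (x : Int) (m : Nat) (dp : List (PySem.Set Int)) :
    (pvSetPass (m : Int) x dp).length = dp.length := by
  rw [pv_setPass_eq]
  exact pv_pass_len _ _ dp

-- membership in the collapsed inner fold
theorem pv_mem_pvGA (x e : Int) (l : List Int) : ∀ (T : PySem.Set Int),
    e ∈ pvGA x l T ↔ e ∈ T ∨ ∃ s ∈ l, e = s + x := by
  induction l with
  | nil => intro T; simp [pvGA]
  | cons h t ih =>
    intro T
    unfold pvGA at *
    simp only [List.foldl_cons]
    rw [ih, PySem.Set.mem_add]
    constructor
    · rintro (⟨h1 | h2⟩ | ⟨s, hs, rfl⟩)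
      · exact Or.inl h1
      · exact Or.inr ⟨h, by simp, h2⟩
      · exact Or.inr ⟨s, by simp [hs], rfl⟩
    · rintro (h1 | ⟨s, hs, rfl⟩)
      · exact Or.inl (Or.inl h1)
      · rcases List.mem_cons.mp hs with rfl | hs
        · exact Or.inl (Or.inr rfl)
        · exact Or.inr ⟨s, hs, rfl⟩

theorem pv_initA_getD (m : Nat) (j : Nat) :
    (PySem.List.pySetD ((List.range (m + 1)).map (fun _ => (PySem.Set.empty : PySem.Set Int))) 0
      (PySem.Set.add (PySem.List.pyGetD ((List.range (m + 1)).map (fun _ => (PySem.Set.empty : PySem.Set Int))) 0 PySem.Set.empty) 0)).getD j PySem.Set.empty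
    = if j = 0 then PySem.Set.add PySem.Set.empty 0 else PySem.Set.empty := by
  rw [List.map_const', List.length_range]
  rw [PySem.List.pyGetD_zero, pv_getD_replicate]
  rw [PySem.List.pySetD_of_nonneg _ _ (le_refl 0)]
  rw [show (0 : Int).toNat = 0 from rfl]
  by_cases hj : j = 0
  · subst hj
    rw [if_pos rfl, pv_getD_set_self _ _ _ _ (by simp)]
  · rw [if_neg hj, pv_getD_set_ne _ _ _ _ _ (fun h => hj h.symm), pv_getD_replicate]

-- sublists of p ++ [x]
theorem pv_sublist_snoc (t p : List Int) (x : Int) :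
    t.Sublist (p ++ [x]) ↔ t.Sublist p ∨ ∃ t', t'.Sublist p ∧ t = t' ++ [x] := by
  rw [List.sublist_append_iff]
  constructor
  · rintro ⟨l1, l2, rfl, h1, h2⟩
    rcases List.sublist_singleton.mp h2 with rfl | rfl
    · exact Or.inl (by simpa using h1)
    · exact Or.inr ⟨l1, h1, rfl⟩
  · rintro (h | ⟨t', h, rfl⟩)
    · exact ⟨t, [], by simp, h, List.nil_sublist _⟩
    · exact ⟨t', [x], rfl, h, List.Sublist.refl _⟩

-- A's DP invariant: slot j of dp holds exactly the sums of length-j sublists of the prefix p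
def pvInvA (p : List Int) (dp : List (PySem.Set Int)) : Prop :=
  ∀ (j : Nat) (s : Int), s ∈ dp.getD j PySem.Set.empty
    ↔ ∃ t : List Int, t.Sublist p ∧ t.sum = s ∧ t.length = j

theorem pv_invA_step (nA : Nat) (p : List Int) (x : Int) (dp : List (PySem.Set Int))
    (hlen : dp.length = nA + 1) (hp : p.length + 1 ≤ nA) (hinv : pvInvA p dp) :
    pvInvA (p ++ [x]) (pvSetPass (nA : Int) x dp) := by
  intro j s
  rw [pv_setPass_getD x nA dp (by omega) j]
  by_cases hj : 1 ≤ j ∧ j ≤ nA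
  · rw [if_pos hj, pv_mem_pvGA]
    constructor
    · rintro (hmem | ⟨s', hs', rfl⟩)
      · obtain ⟨t, ht, hsum, hlen'⟩ := (hinv j s).mp hmem
        exact ⟨t, (pv_sublist_snoc t p x).mpr (Or.inl ht), hsum, hlen'⟩
      · obtain ⟨t', ht', hsum, hlen'⟩ := (hinv (j - 1) s').mp hs'
        exact ⟨t' ++ [x], (pv_sublist_snoc _ p x).mpr (Or.inr ⟨t', ht', rfl⟩),
          by simp [hsum], by simp [hlen']; omega⟩
    · rintro ⟨t, ht, hsum, hlen'⟩
      rcases (pv_sublist_snoc t p x).mp ht with ht | ⟨t', ht', rfl⟩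
      · exact Or.inl ((hinv j s).mpr ⟨t, ht, hsum, hlen'⟩)
      · refine Or.inr ⟨t'.sum, (hinv (j - 1) t'.sum).mpr ⟨t', ht', rfl, ?_⟩, ?_⟩
        · simp at hlen'; omega
        · simp at hsum; omega
  · rw [if_neg hj]
    rw [hinv j s]
    constructor
    · rintro ⟨t, ht, hsum, hlen'⟩
      exact ⟨t, ht.trans (List.sublist_append_left p [x]), hsum, hlen'⟩
    · rintro ⟨t, ht, hsum, hlen'⟩
      have hle := ht.length_le
      simp at hle
      have hj0 : j = 0 := by omega
      have ht0 : t = [] := List.length_eq_zero_iff.mp (by omega)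
      subst ht0
      exact ⟨[], List.nil_sublist _, hsum, hlen'⟩

theorem pv_invA_fold (a : List Int) : ∀ (l p : List Int) (dp : List (PySem.Set Int)),
    p ++ l = a → dp.length = a.length + 1 → pvInvA p dp →
    pvInvA a (l.foldl (fun dp x => pvSetPass ((a.length : Nat) : Int) x dp) dp) := by
  intro l
  induction l with
  | nil =>
    intro p dp hpl hlen hinv
    simp only [List.append_nil] at hpl
    subst hpl
    simpa using hinv
  | cons x t ih =>
    intro p dp hpl hlen hinv
    simp only [List.foldl_cons]
    have hp : p.length + 1 ≤ a.length := by
      have := congrArg List.length hpl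
      simp at this
      omega
    exact ih (p ++ [x]) _ (by simpa using hpl)
      (by rw [pv_setPass_len]; exact hlen)
      (pv_invA_step a.length p x dp hlen hp hinv)

-- A's answer-accumulation helpers
def pvCombA (c : Int) (ans : Option Int) : Option Int :=
  match ans with
  | none => some c
  | some v => if c < v then some c else some v

theorem pvCombA_eq_minO (c : Int) (ans : Option Int) : pvCombA c ans = pvMinO ans c := by
  cases ans with
  | none => rfl
  | some v =>
    simp only [pvCombA, pvMinO, min_def]
    split_ifs <;> simp <;> omega

theorem pvCombA_idem (c : Int) (a : Option Int) : pvCombA c (pvCombA c a) = pvCombA c a := by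
  unfold pvCombA
  cases a with
  | none => simp
  | some v => by_cases h : c < v <;> simp [h]

theorem pv_foldAns (total D n k : Int) (l : List Int) : ∀ (ans : Option Int),
    l.foldl (pvAnsUpd total D n k) ans
    = if ∃ s ∈ l, |total - 2 * s| ≤ D then pvCombA (max k (n - k)) ans else ans := by
  induction l with
  | nil => intro ans; simp
  | cons y t ih =>
    intro ans
    simp only [List.foldl_cons]
    rw [ih]
    have hsplit : (∃ s ∈ y :: t, |total - 2 * s| ≤ D)
        ↔ (|total - 2 * y| ≤ D ∨ ∃ s ∈ t, |total - 2 * s| ≤ D) := by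
      constructor
      · rintro ⟨s, hs, hc⟩
        rcases List.mem_cons.mp hs with rfl | hs
        · exact Or.inl hc
        · exact Or.inr ⟨s, hs, hc⟩
      · rintro (hc | ⟨s, hs, hc⟩)
        · exact ⟨y, by simp, hc⟩
        · exact ⟨s, by simp [hs], hc⟩
    by_cases hh : |total - 2 * y| ≤ D
    · have h1 : pvAnsUpd total D n k ans y = pvCombA (max k (n - k)) ans := by
        unfold pvAnsUpd pvCombA; rw [if_pos hh]
      rw [h1]
      by_cases he : ∃ s ∈ t, |total - 2 * s| ≤ D
      · rw [if_pos he, if_pos (hsplit.mpr (Or.inl hh)), pvCombA_idem]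
      · rw [if_neg he, if_pos (hsplit.mpr (Or.inl hh))]
    · have h1 : pvAnsUpd total D n k ans y = ans := by
        unfold pvAnsUpd; rw [if_neg hh]
      rw [h1]
      by_cases he : ∃ s ∈ t, |total - 2 * s| ≤ D
      · rw [if_pos he, if_pos (hsplit.mpr (Or.inr he))]
      · rw [if_neg he, if_neg (fun hcon => by
          rcases hsplit.mp hcon with h' | h'
          · exact hh h'
          · exact he h')]

theorem min_larger_group_size_A_reduce (a : List Int) (D : Int) :
    ∃ L : List Int, (∀ v, v ∈ L ↔ pvCand a D v) ∧
      min_larger_group_size a D = pvRep (L.foldl pvMinO none) := by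
  unfold min_larger_group_size
  dsimp only
  set dpA0 := PySem.List.pySetD ((List.range (a.length + 1)).map (fun _ => (PySem.Set.empty : PySem.Set Int))) 0
      (PySem.Set.add (PySem.List.pyGetD ((List.range (a.length + 1)).map (fun _ => (PySem.Set.empty : PySem.Set Int))) 0 PySem.Set.empty) 0) with hA0
  have hlenA : dpA0.length = a.length + 1 := by
    rw [hA0, PySem.List.length_pySetD]; simp
  have hinv0 : pvInvA [] dpA0 := by
    intro j s
    rw [hA0, pv_initA_getD]
    by_cases hj : j = 0
    · subst hj
      rw [if_pos rfl, PySem.Set.mem_add]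
      constructor
      · rintro (h | rfl)
        · exact absurd h (by simp [PySem.Set.empty])
        · exact ⟨[], List.nil_sublist _, rfl, rfl⟩
      · rintro ⟨t, ht, hsum, hlen⟩
        have ht0 : t = [] := List.sublist_nil.mp ht
        subst ht0
        exact Or.inr hsum.symm
    · rw [if_neg hj]
      constructor
      · intro h
        exact absurd h (by simp [PySem.Set.empty])
      · rintro ⟨t, ht, _, hlen⟩
        have ht0 : t = [] := List.sublist_nil.mp ht
        subst ht0
        exact absurd hlen.symm hj
  set dpF := a.foldl (fun dp x => pvSetPass ((a.length : Int)) x dp) dpA0 with hF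
  have hinv : pvInvA a dpF := pv_invA_fold a a [] dpA0 (by simp) hlenA hinv0
  set n := ((a.length : Nat) : Int) with hn
  set total := a.sum with htotal
  refine ⟨((PySem.List.pyRange 0 (n + 1) 1).filter
      (fun k => decide (∃ s ∈ PySem.List.pyGetD dpF k PySem.Set.empty, |total - 2 * s| ≤ D))).map
      (fun k => max k (n - k)), ?_, ?_⟩
  · intro v
    simp only [List.mem_map, List.mem_filter, decide_eq_true_eq, PySem.List.mem_pyRange_one]
    constructor
    · rintro ⟨k, ⟨⟨hk0, hkn⟩, s, hs, hcond⟩, rfl⟩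
      rw [PySem.List.pyGetD_of_nonneg _ _ hk0] at hs
      obtain ⟨t, ht, hsum, hlen'⟩ := (hinv k.toNat s).mp hs
      refine ⟨t, ht, by rw [hsum]; exact hcond, ?_⟩
      rw [hlen']
      congr 1 <;> omega
    · rintro ⟨t, ht, hcond, rfl⟩
      refine ⟨(t.length : Int), ⟨⟨by omega, ?_⟩, t.sum, ?_, hcond⟩, rfl⟩
      · have := ht.length_le
        omega
      · rw [PySem.List.pyGetD_natCast]
        exact (hinv t.length t.sum).mpr ⟨t, ht, rfl, rfl⟩
  · have hchain : (PySem.List.pyRange 0 (n + 1) 1).foldl (fun ans k =>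
        (PySem.List.pyGetD dpF k PySem.Set.empty).foldl
          (fun ans s => pvAnsUpd total D n k ans s) ans) none
        = (((PySem.List.pyRange 0 (n + 1) 1).filter
            (fun k => decide (∃ s ∈ PySem.List.pyGetD dpF k PySem.Set.empty, |total - 2 * s| ≤ D))).map
            (fun k => max k (n - k))).foldl pvMinO none := by
      rw [List.foldl_map]
      rw [← PySem.List.foldl_ite_eq_foldl_filter
        (p := fun k => ∃ s ∈ PySem.List.pyGetD dpF k PySem.Set.empty, |total - 2 * s| ≤ D)
        (f := fun ans k => pvMinO ans (max k (n - k)))]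
      apply PySem.List.foldl_congr_mem
      intro ans k _
      rw [pv_foldAns total D n k _ ans, pvCombA_eq_minO]
    rw [hchain]
    cases (((PySem.List.pyRange 0 (n + 1) 1).filter
            (fun k => decide (∃ s ∈ PySem.List.pyGetD dpF k PySem.Set.empty, |total - 2 * s| ≤ D))).map
            (fun k => max k (n - k))).foldl pvMinO none with
    | none => rfl
    | some v => rfl

-- getD of a map over range
theorem pv_getD_range_map {α : Type} (m j : Nat) (f : Nat → α) (d : α) :
    ((List.range m).map f).getD j d = if j < m then f j else d := by
  by_cases h : j < m
  · rw [if_pos h, List.getD_eq_getElem _ _ (by simpa using h)]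
    simp
  · rw [if_neg h, List.getD_eq_default _ _ (by simpa using h)]

-- the state of B's half enumeration (proof name for the fold inside pvHalf)
def pvHalfCur (lst : List Int) : List (PySem.Set Int) :=
  lst.foldl (fun cur x =>
    (List.range (cur.length + 1)).map (fun k =>
      PySem.Set.union
        (if k < cur.length then cur.getD k PySem.Set.empty else PySem.Set.empty)
        (if 0 < k then PySem.Set.ofList ((cur.getD (k - 1) PySem.Set.empty).map (fun s => s + x))
         else PySem.Set.empty)))
    [PySem.Set.ofList [(0 : Int)]]

def pvDoubledSorted (cur : List (PySem.Set Int)) (k : Nat) : List Int :=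
  PySem.List.sorted ((cur.getD k PySem.Set.empty).map (fun s => 2 * s)) (fun v => v) false

theorem pvHalf_eq (lst : List Int) :
    pvHalf lst = PySem.Dict.ofList ((List.range (pvHalfCur lst).length).map (fun k =>
      (((k : Nat) : Int), pvDoubledSorted (pvHalfCur lst) k))) := rfl

-- one step of the half enumeration preserves the sublist characterization
theorem pvHalf_step (x : Int) (p : List Int) (cur : List (PySem.Set Int))
    (hlen : cur.length = p.length + 1)
    (hinv : ∀ (j : Nat) (s : Int), s ∈ cur.getD j PySem.Set.empty ↔
      ∃ t : List Int, t.Sublist p ∧ t.sum = s ∧ t.length = j) :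
    ∀ (j : Nat) (s : Int),
      s ∈ ((List.range (cur.length + 1)).map (fun k =>
        PySem.Set.union
          (if k < cur.length then cur.getD k PySem.Set.empty else PySem.Set.empty)
          (if 0 < k then PySem.Set.ofList ((cur.getD (k - 1) PySem.Set.empty).map (fun s => s + x))
           else PySem.Set.empty))).getD j PySem.Set.empty ↔
      ∃ t : List Int, t.Sublist (p ++ [x]) ∧ t.sum = s ∧ t.length = j := by
  intro j s
  rw [pv_getD_range_map]
  by_cases hj : j < cur.length + 1
  · rw [if_pos hj, PySem.Set.mem_union]
    constructor
    · rintro (h1 | h2)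
      · by_cases hjl : j < cur.length
        · rw [if_pos hjl] at h1
          obtain ⟨t, ht, hsum, hlen'⟩ := (hinv j s).mp h1
          exact ⟨t, (pv_sublist_snoc t p x).mpr (Or.inl ht), hsum, hlen'⟩
        · rw [if_neg hjl] at h1
          exact absurd h1 (by simp [PySem.Set.empty])
      · by_cases hj0 : 0 < j
        · rw [if_pos hj0, PySem.Set.mem_ofList] at h2
          obtain ⟨s', hs', rfl⟩ := List.mem_map.mp h2
          obtain ⟨t', ht', hsum, hlen'⟩ := (hinv (j - 1) s').mp hs'
          exact ⟨t' ++ [x], (pv_sublist_snoc _ p x).mpr (Or.inr ⟨t', ht', rfl⟩),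
            by simp [hsum], by simp [hlen']; omega⟩
        · rw [if_neg hj0] at h2
          exact absurd h2 (by simp [PySem.Set.empty])
    · rintro ⟨t, ht, hsum, hlen'⟩
      rcases (pv_sublist_snoc t p x).mp ht with ht | ⟨t', ht', rfl⟩
      · have hjl : j < cur.length := by
          have := ht.length_le
          omega
        refine Or.inl ?_
        rw [if_pos hjl]
        exact (hinv j s).mpr ⟨t, ht, hsum, hlen'⟩
      · have hj0 : 0 < j := by
          simp at hlen'
          omega
        refine Or.inr ?_
        rw [if_pos hj0, PySem.Set.mem_ofList]
        refine List.mem_map.mpr ⟨t'.sum, (hinv (j - 1) t'.sum).mpr ⟨t', ht', rfl, ?_⟩, ?_⟩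
        · simp at hlen'
          omega
        · simp at hsum
          omega
  · rw [if_neg hj]
    constructor
    · intro h
      exact absurd h (by simp [PySem.Set.empty])
    · rintro ⟨t, ht, _, hlen'⟩
      have := ht.length_le
      simp at this
      omega

theorem pvHalfCur_inv (lst : List Int) :
    (pvHalfCur lst).length = lst.length + 1 ∧
    ∀ (j : Nat) (s : Int), s ∈ (pvHalfCur lst).getD j PySem.Set.empty ↔
      ∃ t : List Int, t.Sublist lst ∧ t.sum = s ∧ t.length = j := by
  suffices h : ∀ (l p : List Int) (cur : List (PySem.Set Int)),
      cur.length = p.length + 1 →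
      (∀ (j : Nat) (s : Int), s ∈ cur.getD j PySem.Set.empty ↔
        ∃ t : List Int, t.Sublist p ∧ t.sum = s ∧ t.length = j) →
      (l.foldl (fun cur x =>
        (List.range (cur.length + 1)).map (fun k =>
          PySem.Set.union
            (if k < cur.length then cur.getD k PySem.Set.empty else PySem.Set.empty)
            (if 0 < k then PySem.Set.ofList ((cur.getD (k - 1) PySem.Set.empty).map (fun s => s + x))
             else PySem.Set.empty))) cur).length = (p ++ l).length + 1 ∧
      ∀ (j : Nat) (s : Int), s ∈ (l.foldl (fun cur x =>
        (List.range (cur.length + 1)).map (fun k =>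
          PySem.Set.union
            (if k < cur.length then cur.getD k PySem.Set.empty else PySem.Set.empty)
            (if 0 < k then PySem.Set.ofList ((cur.getD (k - 1) PySem.Set.empty).map (fun s => s + x))
             else PySem.Set.empty))) cur).getD j PySem.Set.empty ↔
        ∃ t : List Int, t.Sublist (p ++ l) ∧ t.sum = s ∧ t.length = j by
    have h0 : (∀ (j : Nat) (s : Int), s ∈ ([PySem.Set.ofList [(0 : Int)]] : List (PySem.Set Int)).getD j PySem.Set.empty ↔
        ∃ t : List Int, t.Sublist ([] : List Int) ∧ t.sum = s ∧ t.length = j) := by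
      intro j s
      by_cases hj : j = 0
      · subst hj
        simp only [List.getD_cons_zero]
        rw [PySem.Set.mem_ofList]
        constructor
        · intro hs
          simp at hs
          exact ⟨[], List.nil_sublist _, by simp [hs], rfl⟩
        · rintro ⟨t, ht, hsum, _⟩
          have ht0 : t = [] := List.sublist_nil.mp ht
          subst ht0
          simp [← hsum]
      · rw [List.getD_eq_default _ _ (by simp; omega)]
        constructor
        · intro h
          exact absurd h (by simp [PySem.Set.empty])
        · rintro ⟨t, ht, _, hlen'⟩
          have ht0 : t = [] := List.sublist_nil.mp ht
          subst ht0
          exact absurd hlen'.symm hj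
    have := h lst [] [PySem.Set.ofList [(0 : Int)]] rfl h0
    simpa [pvHalfCur] using this
  intro l
  induction l with
  | nil =>
    intro p cur hlen hinv
    simpa using ⟨hlen, hinv⟩
  | cons x t ih =>
    intro p cur hlen hinv
    simp only [List.foldl_cons]
    have hstep := pvHalf_step x p cur hlen hinv
    have hlen2 : ((List.range (cur.length + 1)).map (fun k =>
        PySem.Set.union
          (if k < cur.length then cur.getD k PySem.Set.empty else PySem.Set.empty)
          (if 0 < k then PySem.Set.ofList ((cur.getD (k - 1) PySem.Set.empty).map (fun s => s + x))
           else PySem.Set.empty))).length = (p ++ [x]).length + 1 := by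
      simp [hlen]
    have := ih (p ++ [x]) _ hlen2 hstep
    simpa using this

theorem pvHalf_mem (lst : List Int) (kv : Int × List Int) :
    kv ∈ (pvHalf lst).items ↔
      ∃ k : Nat, k < lst.length + 1 ∧ kv = (((k : Nat) : Int), pvDoubledSorted (pvHalfCur lst) k) := by
  rw [pvHalf_eq]
  have hitems : (PySem.Dict.ofList ((List.range (pvHalfCur lst).length).map (fun k =>
      (((k : Nat) : Int), pvDoubledSorted (pvHalfCur lst) k)))).items
      = (List.range (pvHalfCur lst).length).map (fun k =>
      (((k : Nat) : Int), pvDoubledSorted (pvHalfCur lst) k)) := by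
    show (List.foldl (fun (acc : PySem.Dict Int (List Int)) (p : Int × List Int) =>
      acc.insert p.1 p.2) PySem.Dict.empty _).items = _
    have hfresh : ∀ q ∈ (List.range (pvHalfCur lst).length).map (fun k =>
        (((k : Nat) : Int), pvDoubledSorted (pvHalfCur lst) k)),
        (PySem.Dict.empty : PySem.Dict Int (List Int)).contains q.1 = false := by
      intro q _
      exact PySem.Dict.contains_empty q.1
    have hnd : (((List.range (pvHalfCur lst).length).map (fun k =>
        (((k : Nat) : Int), pvDoubledSorted (pvHalfCur lst) k))).map (fun q => q.1)).Nodup := by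
      rw [List.map_map]
      refine List.Nodup.map ?_ (List.nodup_range)
      intro u v huv
      simpa using huv
    have := PySem.Dict.items_foldl_insert_fresh
      ((List.range (pvHalfCur lst).length).map (fun k =>
        (((k : Nat) : Int), pvDoubledSorted (pvHalfCur lst) k)))
      (fun q => q.1) (fun q => q.2) PySem.Dict.empty hfresh hnd
    simpa using this
  rw [hitems]
  constructor
  · intro h
    obtain ⟨k, hk, rfl⟩ := List.mem_map.mp h
    exact ⟨k, by simpa [(pvHalfCur_inv lst).1] using List.mem_range.mp hk, rfl⟩
  · rintro ⟨k, hk, rfl⟩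
    exact List.mem_map.mpr ⟨k, List.mem_range.mpr (by simp [(pvHalfCur_inv lst).1]; omega), rfl⟩

theorem pvDoubled_mem (lst : List Int) (k : Nat) (w : Int) :
    w ∈ pvDoubledSorted (pvHalfCur lst) k ↔
      ∃ t : List Int, t.Sublist lst ∧ t.length = k ∧ w = 2 * t.sum := by
  unfold pvDoubledSorted
  rw [PySem.List.mem_sorted]
  constructor
  · intro h
    obtain ⟨s, hs, rfl⟩ := List.mem_map.mp h
    obtain ⟨t, ht, rfl, hlen⟩ := ((pvHalfCur_inv lst).2 k s).mp hs
    exact ⟨t, ht, hlen, rfl⟩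
  · rintro ⟨t, ht, hlen, rfl⟩
    exact List.mem_map.mpr ⟨t.sum, ((pvHalfCur_inv lst).2 k t.sum).mpr ⟨t, ht, rfl, hlen⟩, rfl⟩

theorem pvHalf_flat_mem (lst : List Int) (w : Int) :
    w ∈ ((pvHalf lst).values.flatMap (fun l => l)) ↔
      ∃ t : List Int, t.Sublist lst ∧ w = 2 * t.sum := by
  have hvals : (pvHalf lst).values = (pvHalf lst).items.map (fun kv => kv.2) := rfl
  rw [hvals]
  constructor
  · intro h
    obtain ⟨l, hl, hw⟩ := List.mem_flatMap.mp h
    obtain ⟨kv, hkv, rfl⟩ := List.mem_map.mp hl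
    obtain ⟨k, hk, rfl⟩ := (pvHalf_mem lst kv).mp hkv
    obtain ⟨t, ht, _, rfl⟩ := (pvDoubled_mem lst k _).mp hw
    exact ⟨t, ht, rfl⟩
  · rintro ⟨t, ht, rfl⟩
    refine List.mem_flatMap.mpr ⟨pvDoubledSorted (pvHalfCur lst) t.length,
      List.mem_map.mpr ⟨(((t.length : Nat) : Int), pvDoubledSorted (pvHalfCur lst) t.length),
        (pvHalf_mem lst _).mpr ⟨t.length, by have := ht.length_le; omega, rfl⟩, rfl⟩, ?_⟩
    exact (pvDoubled_mem lst t.length _).mpr ⟨t, ht, rfl, rfl⟩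

-- B's two-pointer window test on sorted lists
theorem pvTwoPtr_spec (xs ys : List Int) (lo hi : Int)
    (hx : List.Pairwise (fun a b => a ≤ b) xs) (hy : List.Pairwise (fun a b => a ≤ b) ys) :
    ∀ (d i : Nat) (j : Int), (xs.length - i) + (j + 1).toNat = d → j < ys.length →
    (pvTwoPtr xs ys lo hi i j = true ↔
      ∃ (i' j' : Nat), i ≤ i' ∧ i' < xs.length ∧ j' < ys.length ∧ (j' : Int) ≤ j ∧
        lo ≤ xs.getD i' 0 + ys.getD j' 0 ∧ xs.getD i' 0 + ys.getD j' 0 ≤ hi) := by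
  have hxmono : ∀ (p q : Nat), p ≤ q → q < xs.length → xs.getD p 0 ≤ xs.getD q 0 := by
    intro p q hpq hq
    rcases Nat.eq_or_lt_of_le hpq with rfl | hpq
    · exact le_refl _
    · rw [List.getD_eq_getElem _ _ (by omega), List.getD_eq_getElem _ _ hq]
      exact List.pairwise_iff_getElem.mp hx p q (by omega) hq hpq
  have hymono : ∀ (p q : Nat), p ≤ q → q < ys.length → ys.getD p 0 ≤ ys.getD q 0 := by
    intro p q hpq hq
    rcases Nat.eq_or_lt_of_le hpq with rfl | hpq
    · exact le_refl _
    · rw [List.getD_eq_getElem _ _ (by omega), List.getD_eq_getElem _ _ hq]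
      exact List.pairwise_iff_getElem.mp hy p q (by omega) hq hpq
  intro d
  induction d using Nat.strong_induction_on with
  | _ d ih =>
    intro i j hd hj
    rw [pvTwoPtr]
    by_cases h : i < xs.length ∧ 0 ≤ j
    · rw [dif_pos h]
      dsimp only
      rw [PySem.List.pyGetD_natCast, PySem.List.pyGetD_of_nonneg _ _ h.2]
      by_cases h1 : hi < xs.getD i 0 + ys.getD j.toNat 0
      · rw [if_pos h1]
        rw [ih ((xs.length - i) + (j - 1 + 1).toNat) (by omega) i (j - 1) rfl (by omega)]
        constructor
        · rintro ⟨i', j', hii, hix, hjy, hjj, hwl, hwh⟩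
          exact ⟨i', j', hii, hix, hjy, by omega, hwl, hwh⟩
        · rintro ⟨i', j', hii, hix, hjy, hjj, hwl, hwh⟩
          refine ⟨i', j', hii, hix, hjy, ?_, hwl, hwh⟩
          rcases Nat.lt_or_ge j' j.toNat with hlt | hge
          · omega
          · exfalso
            have hj'j : j' = j.toNat := by omega
            have := hxmono i i' hii hix
            rw [hj'j] at hwh
            omega
      · rw [if_neg h1]
        by_cases h2 : xs.getD i 0 + ys.getD j.toNat 0 < lo
        · rw [if_pos h2]
          rw [ih ((xs.length - (i + 1)) + (j + 1).toNat) (by omega) (i + 1) j rfl hj]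
          constructor
          · rintro ⟨i', j', hii, hix, hjy, hjj, hwl, hwh⟩
            exact ⟨i', j', by omega, hix, hjy, hjj, hwl, hwh⟩
          · rintro ⟨i', j', hii, hix, hjy, hjj, hwl, hwh⟩
            refine ⟨i', j', ?_, hix, hjy, hjj, hwl, hwh⟩
            rcases Nat.lt_or_ge i i' with hlt | hge
            · omega
            · exfalso
              have hi'i : i' = i := by omega
              have := hymono j' j.toNat (by omega) (by omega)
              rw [hi'i] at hwl
              omega
        · rw [if_neg h2]
          constructor
          · intro _
            exact ⟨i, j.toNat, le_refl _, h.1, by omega, by omega, by omega, by omega⟩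
          · intro _
            rfl
    · rw [dif_neg h]
      constructor
      · intro hfalse
        cases hfalse
      · rintro ⟨i', j', hii, hix, hjy, hjj, _, _⟩
        omega

theorem pvHasPair_spec (xs ys : List Int) (lo hi : Int)
    (hx : List.Pairwise (fun a b => a ≤ b) xs) (hy : List.Pairwise (fun a b => a ≤ b) ys) :
    pvHasPair xs ys lo hi = true ↔ ∃ x ∈ xs, ∃ y ∈ ys, lo ≤ x + y ∧ x + y ≤ hi := by
  unfold pvHasPair
  rw [pvTwoPtr_spec xs ys lo hi hx hy _ 0 ((ys.length : Int) - 1) rfl (by omega)]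
  constructor
  · rintro ⟨i', j', _, hix, hjy, _, hwl, hwh⟩
    exact ⟨xs.getD i' 0, by rw [List.getD_eq_getElem _ _ hix]; exact List.getElem_mem _,
      ys.getD j' 0, by rw [List.getD_eq_getElem _ _ hjy]; exact List.getElem_mem _, hwl, hwh⟩
  · rintro ⟨x, hxm, y, hym, hwl, hwh⟩
    obtain ⟨i', hix, rfl⟩ := List.mem_iff_getElem.mp hxm
    obtain ⟨j', hjy, rfl⟩ := List.mem_iff_getElem.mp hym
    exact ⟨i', j', by omega, hix, hjy, by omega,
      by rw [List.getD_eq_getElem _ _ hix, List.getD_eq_getElem _ _ hjy]; exact hwl,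
      by rw [List.getD_eq_getElem _ _ hix, List.getD_eq_getElem _ _ hjy]; exact hwh⟩

-- the first hit of a scan in ascending candidate order is the minimum over all hits
theorem pv_scan_eq (n lo hi : Int) :
    ∀ (L : List ((Int × List Int) × (Int × List Int))),
    (L.map (fun q => max (q.1.1 + q.2.1) (n - q.1.1 - q.2.1))).Pairwise (· ≤ ·) →
    pvScan n lo hi L
      = pvRep (((L.filter (fun q => pvHasPair q.1.2 q.2.2 lo hi)).map
          (fun q => max (q.1.1 + q.2.1) (n - q.1.1 - q.2.1))).foldl pvMinO none) := by
  intro L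
  induction L with
  | nil => intro _; rfl
  | cons q t ih =>
    intro hsort
    have hle : ∀ v ∈ t.map (fun q => max (q.1.1 + q.2.1) (n - q.1.1 - q.2.1)),
        max (q.1.1 + q.2.1) (n - q.1.1 - q.2.1) ≤ v := by
      intro v hv
      obtain ⟨q', hq', rfl⟩ := List.mem_map.mp hv
      exact (List.pairwise_cons.mp hsort).1 _ (List.mem_map.mpr ⟨q', hq', rfl⟩)
    rw [pvScan]
    by_cases hP : pvHasPair q.1.2 q.2.2 lo hi
    · rw [if_pos hP, List.filter_cons_of_pos (by simpa using hP), List.map_cons,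
        pv_minO_fold_cons]
      have hmem : ∀ v ∈ (t.filter (fun q => pvHasPair q.1.2 q.2.2 lo hi)).map
          (fun q => max (q.1.1 + q.2.1) (n - q.1.1 - q.2.1)),
          max (q.1.1 + q.2.1) (n - q.1.1 - q.2.1) ≤ v := by
        intro v hv
        obtain ⟨q', hq', rfl⟩ := List.mem_map.mp hv
        exact hle _ (List.mem_map.mpr ⟨q', List.mem_of_mem_filter hq', rfl⟩)
      have : ((t.filter (fun q => pvHasPair q.1.2 q.2.2 lo hi)).map
          (fun q => max (q.1.1 + q.2.1) (n - q.1.1 - q.2.1))).foldl min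
            (max (q.1.1 + q.2.1) (n - q.1.1 - q.2.1))
          = max (q.1.1 + q.2.1) (n - q.1.1 - q.2.1) := by
        rcases PySem.List.foldl_min_mem ((t.filter (fun q => pvHasPair q.1.2 q.2.2 lo hi)).map
          (fun q => max (q.1.1 + q.2.1) (n - q.1.1 - q.2.1)))
          (max (q.1.1 + q.2.1) (n - q.1.1 - q.2.1)) with h1 | h1
        · exact h1
        · have h2 := (PySem.List.foldl_min_le ((t.filter (fun q => pvHasPair q.1.2 q.2.2 lo hi)).map
            (fun q => max (q.1.1 + q.2.1) (n - q.1.1 - q.2.1)))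
            (max (q.1.1 + q.2.1) (n - q.1.1 - q.2.1))).1
          have h3 := hmem _ h1
          omega
      rw [this]
      rfl
    · rw [if_neg hP, List.filter_cons_of_neg (by simpa using hP)]
      exact ih ((List.pairwise_cons.mp hsort).2)

theorem min_larger_group_size_B_reduce (a : List Int) (D : Int) :
    ∃ L : List Int, (∀ v, v ∈ L ↔ pvCand a D v) ∧
      min_larger_group_size_alt a D = pvRep (L.foldl pvMinO none) := by
  unfold min_larger_group_size_alt
  dsimp only
  set n := ((a.length : Nat) : Int) with hn
  set total := a.sum with htotal
  have hh : PySem.Int.floordiv n 2 = ((a.length / 2 : Nat) : Int) := by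
    rw [hn]
    unfold PySem.Int.floordiv
    rw [Int.fdiv_eq_ediv]
    push_cast
    rfl
  rw [hh, PySem.List.slice_to_natCast, PySem.List.slice_from_natCast]
  set hN := a.length / 2 with hhN
  set Lh := a.take hN with hLh
  set Rh := a.drop hN with hRh
  have hsplit : ∀ t : List Int,
      t.Sublist a ↔ ∃ t1 t2 : List Int, t1.Sublist Lh ∧ t2.Sublist Rh ∧ t = t1 ++ t2 := by
    intro t
    conv_lhs => rw [← List.take_append_drop hN a]
    rw [List.sublist_append_iff]
    constructor
    · rintro ⟨l1, l2, rfl, h1, h2⟩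
      exact ⟨l1, l2, h1, h2, rfl⟩
    · rintro ⟨t1, t2, h1, h2, rfl⟩
      exact ⟨t1, t2, rfl, h1, h2⟩
  -- pvCand restated through the window on doubled half sums
  have hcand : ∀ v : Int, pvCand a D v ↔
      ∃ t1 t2 : List Int, t1.Sublist Lh ∧ t2.Sublist Rh ∧
        total - D ≤ 2 * t1.sum + 2 * t2.sum ∧ 2 * t1.sum + 2 * t2.sum ≤ total + D ∧
        v = max ((t1.length : Int) + (t2.length : Int))
              (n - (t1.length : Int) - (t2.length : Int)) := by
    intro v
    constructor
    · rintro ⟨t, hsub, hcond, rfl⟩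
      obtain ⟨t1, t2, ht1, ht2, rfl⟩ := (hsplit _).mp hsub
      rw [List.sum_append, abs_le] at hcond
      refine ⟨t1, t2, ht1, ht2, by omega, by omega, ?_⟩
      simp only [List.length_append]
      push_cast
      omega
    · rintro ⟨t1, t2, ht1, ht2, hw1, hw2, rfl⟩
      refine ⟨t1 ++ t2, (hsplit _).mpr ⟨t1, t2, ht1, ht2, rfl⟩, ?_, ?_⟩
      · rw [List.sum_append, abs_le]
        omega
      · simp only [List.length_append]
        push_cast
        omega
  by_cases hpre : pvHasPair
      (PySem.List.sorted ((pvHalf Lh).values.flatMap (fun la => la)) (fun v => v) false)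
      (PySem.List.sorted ((pvHalf Rh).values.flatMap (fun lb => lb)) (fun v => v) false)
      (total - D) (total + D) = false
  · rw [if_pos hpre]
    refine ⟨[], ?_, rfl⟩
    intro v
    simp only [List.not_mem_nil, false_iff]
    intro hv
    obtain ⟨t1, t2, ht1, ht2, hw1, hw2, _⟩ := (hcand v).mp hv
    have : pvHasPair
        (PySem.List.sorted ((pvHalf Lh).values.flatMap (fun la => la)) (fun v => v) false)
        (PySem.List.sorted ((pvHalf Rh).values.flatMap (fun lb => lb)) (fun v => v) false)
        (total - D) (total + D) = true := by
      rw [pvHasPair_spec _ _ _ _ (PySem.List.sorted_pairwise _ _) (PySem.List.sorted_pairwise _ _)]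
      refine ⟨2 * t1.sum, ?_, 2 * t2.sum, ?_, by omega, by omega⟩
      · rw [PySem.List.mem_sorted]
        exact (pvHalf_flat_mem Lh _).mpr ⟨t1, ht1, rfl⟩
      · rw [PySem.List.mem_sorted]
        exact (pvHalf_flat_mem Rh _).mpr ⟨t2, ht2, rfl⟩
    rw [hpre] at this
    cases this
  · rw [if_neg hpre]
    set pairsL := PySem.List.sorted
      ((pvHalf Lh).items.flatMap (fun pa => (pvHalf Rh).items.map (fun pb => (pa, pb))))
      (fun q => max (q.1.1 + q.2.1) (n - q.1.1 - q.2.1)) false with hpairsL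
    refine ⟨(pairsL.filter (fun q => pvHasPair q.1.2 q.2.2 (total - D) (total + D))).map
        (fun q => max (q.1.1 + q.2.1) (n - q.1.1 - q.2.1)), ?_, ?_⟩
    · intro v
      rw [hcand v]
      simp only [List.mem_map, List.mem_filter]
      constructor
      · rintro ⟨q, ⟨hqm, hqP⟩, rfl⟩
        rw [hpairsL, PySem.List.mem_sorted, List.mem_flatMap] at hqm
        obtain ⟨pa, hpa, hq⟩ := hqm
        obtain ⟨pb, hpb, rfl⟩ := List.mem_map.mp hq
        obtain ⟨kA, hkA, rfl⟩ := (pvHalf_mem Lh pa).mp hpa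
        obtain ⟨kB, hkB, rfl⟩ := (pvHalf_mem Rh pb).mp hpb
        dsimp only at hqP
        rw [pvHasPair_spec _ _ _ _
          (by unfold pvDoubledSorted; exact PySem.List.sorted_pairwise _ _)
          (by unfold pvDoubledSorted; exact PySem.List.sorted_pairwise _ _)] at hqP
        obtain ⟨x, hx, y, hy, hw1, hw2⟩ := hqP
        obtain ⟨t1, ht1, hl1, rfl⟩ := (pvDoubled_mem Lh kA x).mp hx
        obtain ⟨t2, ht2, hl2, rfl⟩ := (pvDoubled_mem Rh kB y).mp hy
        exact ⟨t1, t2, ht1, ht2, hw1, hw2, by rw [hl1, hl2]⟩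
      · rintro ⟨t1, t2, ht1, ht2, hw1, hw2, rfl⟩
        refine ⟨((((t1.length : Nat) : Int), pvDoubledSorted (pvHalfCur Lh) t1.length),
            (((t2.length : Nat) : Int), pvDoubledSorted (pvHalfCur Rh) t2.length)), ⟨?_, ?_⟩, rfl⟩
        · rw [hpairsL, PySem.List.mem_sorted, List.mem_flatMap]
          refine ⟨(((t1.length : Nat) : Int), pvDoubledSorted (pvHalfCur Lh) t1.length),
            (pvHalf_mem Lh _).mpr ⟨t1.length, by have := ht1.length_le; omega, rfl⟩, ?_⟩
          exact List.mem_map.mpr ⟨(((t2.length : Nat) : Int), pvDoubledSorted (pvHalfCur Rh) t2.length),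
            (pvHalf_mem Rh _).mpr ⟨t2.length, by have := ht2.length_le; omega, rfl⟩, rfl⟩
        · dsimp only
          rw [pvHasPair_spec _ _ _ _
            (by unfold pvDoubledSorted; exact PySem.List.sorted_pairwise _ _)
            (by unfold pvDoubledSorted; exact PySem.List.sorted_pairwise _ _)]
          refine ⟨2 * t1.sum, ?_, 2 * t2.sum, ?_, hw1, hw2⟩
          · exact (pvDoubled_mem Lh t1.length _).mpr ⟨t1, ht1, rfl, rfl⟩
          · exact (pvDoubled_mem Rh t2.length _).mpr ⟨t2, ht2, rfl, rfl⟩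
    · rw [hpairsL]
      exact pv_scan_eq n (total - D) (total + D) _ (PySem.List.sorted_map_key_pairwise _ _)

theorem pv_final (a : List Int) (D : Int) :
    min_larger_group_size a D = min_larger_group_size_alt a D := by
  obtain ⟨L1, h1, e1⟩ := min_larger_group_size_A_reduce a D
  obtain ⟨L2, h2, e2⟩ := min_larger_group_size_B_reduce a D
  rw [e1, e2, pv_minO_fold_mem_eq L1 L2 (fun v => (h1 v).trans (h2 v).symm)]

-- ===== VERDICT (by name: the statement is the Claim_ definition above) =====
theorem min_larger_group_size_spec : Claim_equal_min_larger_group_size := by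
  intro a D _
  unfold Spec_min_larger_group_size
  exact pv_final a D
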